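-- pv_equiv track=rewrite | github.com/Modovado/AICUP2022-Comp-NLP | NLP_index_label/xlm-roberta-large/NLP_index/NLP_index_train.py | extractive_summarization_label
-- ===== SOURCE A (Python) =====
-- def extractive_summarization_label(text, prime_text):
--     # OUTPUT
--     labels = []
--     idxs = []
--
--     # drop item if it not in both list
--     XOR = set(text) ^ set(prime_text)
--     prime_text = [i for i in prime_text if i not in XOR]
--
--     for idx, token in enumerate(text):
--         # first check prime_text[0] is ever exists in text
--
--         if prime_text and token == prime_text[0]:  # if prime_text is not []
--             # label
--             labels.append(1)
--             # `new` prime_text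
--             prime_text = prime_text[1:]
--             # index
--             idxs.append(idx)
--
--         else:
--             labels.append(0)
--
--     return labels
-- ===== SOURCE B (Python) =====
-- def extractive_summarization_label(text, prime_text):
--     # one pass with an integer pointer into the filtered prime_text (no repeated list slicing)
--     text_set = set(text)
--     filtered = [t for t in prime_text if t in text_set]
--     labels = []
--     j = 0
--     n = len(filtered)
--     for token in text:
--         if j < n and token == filtered[j]:
--             labels.append(1)
--             j += 1
--         else:
--             labels.append(0)
--     return labels
-- ===== Notes on version B (the rewrite author's own statement) =====
-- stated objective: faster
-- what changed: Replaces the symmetric-difference filter and the repeated prime_text[1:] list slicing with a set(text) membership filter and a single integer pointer advanced through the filtered list.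
import Mathlib
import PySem

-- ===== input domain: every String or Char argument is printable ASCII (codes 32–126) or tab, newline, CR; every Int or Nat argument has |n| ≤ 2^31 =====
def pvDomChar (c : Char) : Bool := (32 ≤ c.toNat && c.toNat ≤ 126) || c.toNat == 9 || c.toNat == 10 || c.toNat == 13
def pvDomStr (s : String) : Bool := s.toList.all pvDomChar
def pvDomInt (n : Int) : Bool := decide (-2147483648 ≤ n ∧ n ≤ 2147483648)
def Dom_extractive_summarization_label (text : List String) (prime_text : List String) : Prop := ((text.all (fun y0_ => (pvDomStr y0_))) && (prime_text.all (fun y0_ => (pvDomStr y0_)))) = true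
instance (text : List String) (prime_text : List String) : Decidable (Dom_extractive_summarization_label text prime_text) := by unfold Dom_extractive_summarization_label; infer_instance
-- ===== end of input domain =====

-- B replaces A's XOR filter + repeated prime_text[1:] slicing by a set(text) filter and an
-- integer pointer advanced through the filtered list; equal return value on all inputs.

-- ===== PORT A =====
-- one iteration of A's for-loop; state = (labels, remaining prime_text, idxs), branches in A's order
def pvFoldStep (s : List Int × List String × List Int) (p : Int × String) :
    List Int × List String × List Int :=
  match s.2.1 with
  | [] => (s.1 ++ [(0 : Int)], s.2.1, s.2.2)
  | r :: rs =>
    if p.2 = r then (s.1 ++ [(1 : Int)], rs, s.2.2 ++ [p.1])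
    else (s.1 ++ [(0 : Int)], r :: rs, s.2.2)

def extractive_summarization_label (text : List String) (prime_text : List String) : List Int :=
  let XOR := PySem.Set.symmDiff (PySem.Set.ofList text) (PySem.Set.ofList prime_text)
  let pt := prime_text.filter (fun i => !(PySem.Set.contains XOR i))
  let st := (PySem.List.enumerate text).foldl pvFoldStep (([] : List Int), pt, ([] : List Int))
  st.1

-- ===== PORT B =====
-- the pointer loop: labels for ts, matching fs from position j
def pvAltLoop (fs : List String) : List String → Nat → List Int
  | [], _ => []
  | t :: ts, j =>
    if fs[j]? = some t then (1 : Int) :: pvAltLoop fs ts (j + 1)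
    else (0 : Int) :: pvAltLoop fs ts j

def extractive_summarization_label_alt (text : List String) (prime_text : List String) : List Int :=
  let tset := PySem.Set.ofList text
  let fs := prime_text.filter (fun t => PySem.Set.contains tset t)
  pvAltLoop fs text 0

-- ===== PRECONDITION & SPEC =====
def Spec_extractive_summarization_label (text : List String) (prime_text : List String) (out : List Int) : Prop := out = extractive_summarization_label_alt text prime_text
instance (text : List String) (prime_text : List String) (out : List Int) : Decidable (Spec_extractive_summarization_label text prime_text out) := by unfold Spec_extractive_summarization_label; infer_instance

-- ===== CLAIM (what is proved, stated in full; the proofs are below) =====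
def Claim_equal_extractive_summarization_label : Prop := ∀ (text : List String) (prime_text : List String), Dom_extractive_summarization_label text prime_text → Spec_extractive_summarization_label text prime_text (extractive_summarization_label text prime_text)

-- ===== LEMMAS AND PROOFS =====

-- the two filters keep the same tokens: for i ∈ prime_text, i ∉ set(text) ^ set(prime_text) ↔ i ∈ set(text)
theorem pv_filter_eq (text prime_text : List String) :
    prime_text.filter
      (fun i => !(PySem.Set.contains (PySem.Set.symmDiff (PySem.Set.ofList text) (PySem.Set.ofList prime_text)) i)) =
    prime_text.filter (fun t => PySem.Set.contains (PySem.Set.ofList text) t) := by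
  apply List.filter_congr
  intro x hx
  simp [PySem.Set.mem_symmDiff, PySem.Set.mem_ofList, hx]

-- A's fold with remaining list `fs.drop j` computes the same labels as B's pointer loop at j
theorem pv_fold_eq_altLoop (ts : List String) :
    ∀ (fs : List String) (j : Nat) (labels : List Int) (idxs : List Int) (k : Int),
    ((PySem.List.enumerate ts k).foldl pvFoldStep (labels, fs.drop j, idxs)).1 =
      labels ++ pvAltLoop fs ts j := by
  induction ts with
  | nil => intro fs j labels idxs k; simp [PySem.List.enumerate, pvAltLoop]
  | cons t ts ih =>
    intro fs j labels idxs k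
    rw [PySem.List.enumerate_cons, List.foldl_cons]
    rcases h : fs.drop j with _ | ⟨r, rs⟩
    · have hlen : fs.length ≤ j := by
        have := List.drop_eq_nil_iff.mp h
        omega
      have hn : fs[j]? = none := List.getElem?_eq_none hlen
      have hi := ih fs j (labels ++ [(0 : Int)]) idxs (k + 1)
      rw [h] at hi
      rw [show pvFoldStep (labels, ([] : List String), idxs) (k, t)
            = (labels ++ [(0 : Int)], ([] : List String), idxs) from rfl, hi]
      simp [pvAltLoop, hn]
    · have hg : fs[j]? = some r := by
        have h0 : (fs.drop j)[0]? = some r := by rw [h]; rfl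
        rwa [List.getElem?_drop, Nat.add_zero] at h0
      have hdrop : fs.drop (j + 1) = rs := by
        calc fs.drop (j + 1) = (fs.drop j).drop 1 := by rw [List.drop_drop]
          _ = rs := by rw [h]; simp
      by_cases ht : t = r
      · have hi := ih fs (j + 1) (labels ++ [(1 : Int)]) (idxs ++ [k]) (k + 1)
        rw [hdrop] at hi
        rw [show pvFoldStep (labels, r :: rs, idxs) (k, t)
              = (labels ++ [(1 : Int)], rs, idxs ++ [k]) from by simp [pvFoldStep, ht], hi]
        simp [pvAltLoop, hg, ht]
      · have hi := ih fs j (labels ++ [(0 : Int)]) idxs (k + 1)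
        rw [h] at hi
        rw [show pvFoldStep (labels, r :: rs, idxs) (k, t)
              = (labels ++ [(0 : Int)], r :: rs, idxs) from by simp [pvFoldStep, ht], hi]
        have hne : ¬ fs[j]? = some t := by
          rw [hg]; exact fun e => ht (Option.some.inj e).symm
        simp [pvAltLoop, hne]

-- ===== VERDICT (by name: the statement is the Claim_ definition above) =====
theorem extractive_summarization_label_spec : Claim_equal_extractive_summarization_label := by
  intro text prime_text _
  unfold Spec_extractive_summarization_label extractive_summarization_label extractive_summarization_label_alt
  dsimp only
  rw [pv_filter_eq]
  have := pv_fold_eq_altLoop text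
    (prime_text.filter (fun t => PySem.Set.contains (PySem.Set.ofList text) t)) 0 [] [] 0
  simpa using this
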